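-- pv_equiv track=rewrite | github.com/Pieselos/matura_dodatkowa_2023 | zadanie_2.3.py | czymniejszy
-- ===== SOURCE A (Python) =====
-- def czymniejszy(n,s,k1,k2):
--
--     n=n-1
--     k1=k1-1
--     k2=k2-1
--
--     i = k1
--     j = k2
--     while i <= n and j <= n:
--         if s[i] == s[j]:
--             i = i+1
--             j = j+1
--         else:
--             if s[i]<s[j]:
--                 return True
--             else:
--                 return False
--     if j<= n:
--         return True
--     else:
--         return False
-- ===== SOURCE B (Python) =====
-- def czymniejszy(n, s, k1, k2):
--     # take the two 1-based suffixes as slices (exclusive end n) and let Python's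
--     # built-in lexicographic string comparison decide
--     return s[k1-1:n] < s[k2-1:n]
-- ===== Notes on version B (the rewrite author's own statement) =====
-- stated objective: simpler
-- what changed: Replaces the explicit lockstep character-by-character while loop with early returns by one closed-form comparison of the two suffix slices using the built-in lexicographic '<' on strings.
-- outside the precondition, e.g. on czymniejszy(3, 'bab', 0, 1): A returns False, B returns True; on czymniejszy(-1, 'abc', 1, 2): A returns False, B returns True; on czymniejszy(5, 'ab', 6, 3): A returns True, B returns False
import Mathlib
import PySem

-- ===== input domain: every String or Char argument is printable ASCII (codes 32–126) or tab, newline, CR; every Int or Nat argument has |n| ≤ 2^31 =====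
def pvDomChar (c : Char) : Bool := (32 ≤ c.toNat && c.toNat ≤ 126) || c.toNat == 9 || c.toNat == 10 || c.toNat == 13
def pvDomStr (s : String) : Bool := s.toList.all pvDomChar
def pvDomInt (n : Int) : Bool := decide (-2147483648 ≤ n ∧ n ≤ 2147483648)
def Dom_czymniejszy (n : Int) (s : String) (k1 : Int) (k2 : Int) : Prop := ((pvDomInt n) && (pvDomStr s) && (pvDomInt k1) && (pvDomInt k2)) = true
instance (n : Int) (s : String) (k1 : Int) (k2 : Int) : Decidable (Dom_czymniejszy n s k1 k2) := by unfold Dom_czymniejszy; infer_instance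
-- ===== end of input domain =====

-- B replaces A's lockstep character loop (with early returns) by one closed-form
-- lexicographic comparison of the two suffix slices (objective: simpler).

-- ===== PORT A =====
-- the while loop of A: i, j walk in lockstep while both ≤ n (n already decremented);
-- Python raises IndexError where pyGet? is none — those inputs are outside Pre_ (dead `false` branch)
def czLoop (cs : List Char) (n i j : Int) : Bool :=
  if _h : i ≤ n ∧ j ≤ n then
    match PySem.List.pyGet? cs i, PySem.List.pyGet? cs j with
    | some a, some b => if a = b then czLoop cs n (i + 1) (j + 1) else decide (a < b)
    | _, _ => false
  else if j ≤ n then true else false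
termination_by (n + 1 - i).toNat
decreasing_by omega

def czymniejszy (n : Int) (s : String) (k1 : Int) (k2 : Int) : Bool :=
  czLoop s.toList (n - 1) (k1 - 1) (k2 - 1)

-- ===== PORT B =====
-- Python's built-in `<` on two strings: lexicographic by code point, a proper prefix is smaller
def ltChars : List Char → List Char → Bool
  | _, [] => false
  | [], _ :: _ => true
  | a :: as, b :: bs => if a = b then ltChars as bs else decide (a < b)

-- s[k1-1:n] < s[k2-1:n]
def czymniejszy_alt (n : Int) (s : String) (k1 : Int) (k2 : Int) : Bool :=
  ltChars (PySem.List.slice s.toList (some (k1 - 1)) (some n))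
          (PySem.List.slice s.toList (some (k2 - 1)) (some n))

-- ===== PRECONDITION & SPEC =====
-- Pre_ admits the function's intended 1-indexed domain (1 ≤ k1, k2 and 0 ≤ n ≤ len(s)) and, for
-- n > len(s), exactly the inputs where A still returns a value B agrees with: the scan hits an
-- in-range character mismatch, or the loop is skipped with k2 past n or k2 inside the string —
-- plus five further corner families on which both sides provably agree: n < 0 with k2 past
-- len(s)+n (skipped loop vs empty right slice), k1 = k2 with valid reads (both trivially False),
-- n < 0 with both k nonpositive but within the string (both compare the same wrapped windows),
-- and two skipped-loop families stated with the slice-clamp bounds: k2 past n with an empty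
-- right slice (both False), and k1 past n with an empty left and nonempty right slice (both True).
-- Outside Pre_ A raises IndexError when the lockstep scan walks past the end of s, and where it
-- happens to return its value comes from Python negative-index wraparound (k ≤ 0, n < 0) or from
-- loop bookkeeping comparing positions past the string (n > len(s) with k1 > n but len(s) ≤ k2-1 < n)
-- — corners no caller of this 1-based suffix comparison would specify, where B's slice-clamping
-- values are equally accidental (examples in claim.json "cites").
def Pre_czymniejszy (n : Int) (s : String) (k1 : Int) (k2 : Int) : Prop :=
  (1 ≤ k1 ∧ 1 ≤ k2 ∧
   ((0 ≤ n ∧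
     (n ≤ (s.toList.length : Int) ∨ n ≤ k2 - 1 ∨
      (n ≤ k1 - 1 ∧ k2 - 1 < (s.toList.length : Int)) ∨
      (∃ t : ℕ, t < s.toList.length ∧ (k1 - 1) + (t : Int) < (s.toList.length : Int) ∧
        (k2 - 1) + (t : Int) < (s.toList.length : Int) ∧
        s.toList[((k1 - 1) + (t : Int)).toNat]? ≠ s.toList[((k2 - 1) + (t : Int)).toNat]?))) ∨
    (n < 0 ∧ (s.toList.length : Int) + n ≤ k2 - 1))) ∨
  (k1 = k2 ∧ (n ≤ k1 - 1 ∨ (-(s.toList.length : Int) ≤ k1 - 1 ∧ n ≤ (s.toList.length : Int)))) ∨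
  (n < 0 ∧ k1 ≤ 0 ∧ k2 ≤ 0 ∧ -(s.toList.length : Int) ≤ k1 - 1 ∧ -(s.toList.length : Int) ≤ k2 - 1) ∨
  (n ≤ k2 - 1 ∧
   PySem.List.clampIdx s.toList.length n ≤ PySem.List.clampIdx s.toList.length (k2 - 1)) ∨
  (n ≤ k1 - 1 ∧ k2 - 1 ≤ n - 1 ∧
   PySem.List.clampIdx s.toList.length n ≤ PySem.List.clampIdx s.toList.length (k1 - 1) ∧
   PySem.List.clampIdx s.toList.length (k2 - 1) < PySem.List.clampIdx s.toList.length n ∧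
   PySem.List.clampIdx s.toList.length (k2 - 1) < s.toList.length)
instance (n : Int) (s : String) (k1 : Int) (k2 : Int) : Decidable (Pre_czymniejszy n s k1 k2) := by unfold Pre_czymniejszy; infer_instance

def pvWitness_czymniejszy : Int × String × Int × Int := (3, "aba", 2, 1)

def Spec_czymniejszy (n : Int) (s : String) (k1 : Int) (k2 : Int) (out : Bool) : Prop := out = czymniejszy_alt n s k1 k2
instance (n : Int) (s : String) (k1 : Int) (k2 : Int) (out : Bool) : Decidable (Spec_czymniejszy n s k1 k2 out) := by unfold Spec_czymniejszy; infer_instance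

-- ===== CLAIM (what is proved, stated in full; the proofs are below) =====
def Claim_equal_czymniejszy : Prop := ∀ (n : Int) (s : String) (k1 : Int) (k2 : Int), Dom_czymniejszy n s k1 k2 → Pre_czymniejszy n s k1 k2 → Spec_czymniejszy n s k1 k2 (czymniejszy n s k1 k2)

-- ===== LEMMAS AND PROOFS =====

-- a nonnegative in-range Python index: pyGet? returns exactly that element
lemma pyGet?_eq_some (cs : List Char) (x : Int) (h0 : 0 ≤ x) (h1 : x < (cs.length : Int)) :
    PySem.List.pyGet? cs x = some cs[x.toNat] := by
  simp only [PySem.List.pyGet?, PySem.List.pyIdx?]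
  rw [if_pos h0, if_pos h1]
  rw [show ((some x.toNat).bind fun k => cs[k]?) = cs[x.toNat]? from rfl,
      List.getElem?_eq_getElem (by omega)]

-- A's loop equals the lexicographic comparison of the two (drop …).take … suffix windows,
-- for nonnegative start indices and n at most the string length
lemma czLoop_eq_ltChars (cs : List Char) (n : Int) (hn0 : 0 ≤ n)
    (hnL : n ≤ (cs.length : Int)) :
    ∀ (i j : Int), 0 ≤ i → 0 ≤ j →
      czLoop cs (n - 1) i j =
        ltChars ((cs.drop i.toNat).take (n.toNat - i.toNat))
                ((cs.drop j.toNat).take (n.toNat - j.toNat)) := by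
  intro i j
  induction hfuel : (n - i).toNat using Nat.strong_induction_on generalizing i j with
  | _ f ih =>
    intro hi0 hj0
    rw [czLoop]
    by_cases hcond : i ≤ n - 1 ∧ j ≤ n - 1
    · obtain ⟨hin, hjn⟩ := hcond
      rw [dif_pos ⟨hin, hjn⟩]
      rw [pyGet?_eq_some cs i hi0 (by omega), pyGet?_eq_some cs j hj0 (by omega)]
      have hiL : i.toNat < cs.length := by omega
      have hjL : j.toNat < cs.length := by omega
      rw [List.drop_eq_getElem_cons hiL, List.drop_eq_getElem_cons hjL,
          show n.toNat - i.toNat = (n.toNat - (i + 1).toNat) + 1 by omega,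
          show n.toNat - j.toNat = (n.toNat - (j + 1).toNat) + 1 by omega,
          List.take_succ_cons, List.take_succ_cons]
      simp only [ltChars]
      have hstep : i.toNat + 1 = (i + 1).toNat := by omega
      have hstep' : j.toNat + 1 = (j + 1).toNat := by omega
      rw [hstep, hstep']
      by_cases heq : cs[i.toNat] = cs[j.toNat]
      · rw [if_pos heq, if_pos heq]
        exact ih (n - (i + 1)).toNat (by omega) (i + 1) (j + 1) rfl (by omega) (by omega)
      · rw [if_neg heq, if_neg heq]
    · rw [dif_neg hcond]
      rcases not_and_or.mp hcond with hi' | hj'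
      · -- i ≥ n: left window empty; A returns (j ≤ n - 1)
        rw [show n.toNat - i.toNat = 0 by omega, List.take_zero]
        by_cases hj2 : j ≤ n - 1
        · rw [if_pos hj2]
          have : (cs.drop j.toNat).take (n.toNat - j.toNat) ≠ [] := by
            have hlen : ((cs.drop j.toNat).take (n.toNat - j.toNat)).length > 0 := by
              rw [List.length_take, List.length_drop]; omega
            exact List.ne_nil_of_length_pos hlen
          cases hys : (cs.drop j.toNat).take (n.toNat - j.toNat) with
          | nil => exact absurd hys this
          | cons b bs => rfl
        · rw [if_neg hj2, show n.toNat - j.toNat = 0 by omega, List.take_zero]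
          rfl
      · -- j ≥ n: right window empty; A returns False
        rw [if_neg hj', show n.toNat - j.toNat = 0 by omega, List.take_zero]
        cases (cs.drop i.toNat).take (n.toNat - i.toNat) <;> rfl

-- under an in-range character mismatch ahead, A's loop and the slice comparison agree
-- even when n exceeds the string length (both stop at the differing character)
lemma czLoop_eq_of_mismatch (cs : List Char) (n : Int) :
    ∀ (t : ℕ) (i j : Int), 0 ≤ i → 0 ≤ j →
      i + (t : Int) < (cs.length : Int) → j + (t : Int) < (cs.length : Int) →
      i + (t : Int) < n → j + (t : Int) < n →
      cs[(i + (t : Int)).toNat]? ≠ cs[(j + (t : Int)).toNat]? →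
      czLoop cs (n - 1) i j =
        ltChars ((cs.drop i.toNat).take (n.toNat - i.toNat))
                ((cs.drop j.toNat).take (n.toNat - j.toNat)) := by
  intro t
  induction t with
  | zero =>
    intro i j hi0 hj0 hiL hjL hin hjn hne
    simp only [Int.natCast_zero, add_zero] at hiL hjL hin hjn hne
    rw [czLoop, dif_pos ⟨by omega, by omega⟩,
        pyGet?_eq_some cs i hi0 hiL, pyGet?_eq_some cs j hj0 hjL]
    have hiNat : i.toNat < cs.length := by omega
    have hjNat : j.toNat < cs.length := by omega
    have hneq : cs[i.toNat] ≠ cs[j.toNat] := by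
      intro h; exact hne (by rw [List.getElem?_eq_getElem hiNat, List.getElem?_eq_getElem hjNat, h])
    rw [List.drop_eq_getElem_cons hiNat, List.drop_eq_getElem_cons hjNat,
        show n.toNat - i.toNat = (n.toNat - (i + 1).toNat) + 1 by omega,
        show n.toNat - j.toNat = (n.toNat - (j + 1).toNat) + 1 by omega,
        List.take_succ_cons, List.take_succ_cons]
    simp only [ltChars]
    rw [if_neg hneq, if_neg hneq]
  | succ t ih =>
    intro i j hi0 hj0 hiL hjL hin hjn hne
    have hiNat : i.toNat < cs.length := by omega
    have hjNat : j.toNat < cs.length := by omega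
    rw [czLoop, dif_pos ⟨by omega, by omega⟩,
        pyGet?_eq_some cs i hi0 (by omega), pyGet?_eq_some cs j hj0 (by omega),
        List.drop_eq_getElem_cons hiNat, List.drop_eq_getElem_cons hjNat,
        show n.toNat - i.toNat = (n.toNat - (i + 1).toNat) + 1 by omega,
        show n.toNat - j.toNat = (n.toNat - (j + 1).toNat) + 1 by omega,
        List.take_succ_cons, List.take_succ_cons]
    simp only [ltChars]
    rw [show i.toNat + 1 = (i + 1).toNat by omega, show j.toNat + 1 = (j + 1).toNat by omega]
    by_cases heq : cs[i.toNat] = cs[j.toNat]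
    · rw [if_pos heq, if_pos heq]
      exact ih (i + 1) (j + 1) (by omega) (by omega) (by omega) (by omega) (by omega) (by omega)
        (by rw [show i + 1 + (t : Int) = i + ((t : ℕ) + 1 : Int) by ring,
                show j + 1 + (t : Int) = j + ((t : ℕ) + 1 : Int) by ring]
            exact_mod_cast hne)
    · rw [if_neg heq, if_neg heq]

-- an in-range Python index (possibly negative, wrapping from the end) never raises:
-- pyGet? is `some` of the total pyGetD
lemma pyGet?_eq_some_pyGetD (cs : List Char) (x : Int) (d : Char)
    (h : PySem.Raise.InRange cs.length x) :
    PySem.List.pyGet? cs x = some (PySem.List.pyGetD cs x d) := by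
  obtain ⟨h1, h2⟩ := h
  simp only [PySem.List.pyGetD, PySem.List.pyGet?, PySem.List.pyIdx?]
  by_cases h0 : 0 ≤ x
  · rw [if_pos h0, if_pos h2]
    rw [show ((some x.toNat).bind fun k => cs[k]?) = cs[x.toNat]? from rfl,
        List.getElem?_eq_getElem (by omega)]
    rfl
  · rw [if_neg h0, if_pos h1]
    rw [show ((some (cs.length - (-x).toNat)).bind fun k => cs[k]?) = cs[cs.length - (-x).toNat]? from rfl,
        List.getElem?_eq_getElem (by omega)]
    rfl

-- Python never considers a string less than itself
lemma ltChars_self (xs : List Char) : ltChars xs xs = false := by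
  induction xs with
  | nil => rfl
  | cons x xs ih => simp only [ltChars]; simpa using ih

-- A's loop with both cursors equal always scans equal characters and ends in False
lemma czLoop_diag (cs : List Char) (n : Int) (hnL : n ≤ (cs.length : Int)) :
    ∀ i : Int, -(cs.length : Int) ≤ i → czLoop cs (n - 1) i i = false := by
  intro i
  induction hfuel : (n - i).toNat using Nat.strong_induction_on generalizing i with
  | _ f ih =>
    intro hi
    rw [czLoop]
    by_cases hc : i ≤ n - 1
    · rw [dif_pos ⟨hc, hc⟩, pyGet?_eq_some_pyGetD cs i 'a' ⟨hi, by omega⟩]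
      show (if PySem.List.pyGetD cs i 'a' = PySem.List.pyGetD cs i 'a' then
              czLoop cs (n - 1) (i + 1) (i + 1)
            else decide (PySem.List.pyGetD cs i 'a' < PySem.List.pyGetD cs i 'a')) = false
      rw [if_pos rfl]
      exact ih (n - (i + 1)).toNat (by omega) (i + 1) rfl (by omega)
    · rw [dif_neg (by omega), if_neg hc]

-- a nonnegative in-range Python index from the negative side
lemma pyGet?_neg_eq_some (cs : List Char) (i : Int)
    (h1 : -(cs.length : Int) ≤ i) (h2 : i < 0)
    (hlt : ((cs.length : Int) + i).toNat < cs.length) :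
    PySem.List.pyGet? cs i = some cs[((cs.length : Int) + i).toNat] := by
  simp only [PySem.List.pyGet?, PySem.List.pyIdx?]
  rw [if_neg (by omega), if_pos h1]
  rw [show ((some (cs.length - (-i).toNat)).bind fun k => cs[k]?) = cs[cs.length - (-i).toNat]? from rfl,
      show cs.length - (-i).toNat = ((cs.length : Int) + i).toNat by omega,
      List.getElem?_eq_getElem hlt]

-- PySem.List.slice written out as clamped drop/take (definitional)
lemma slice_eq_clamp (xs : List Char) (a b : Int) :
    PySem.List.slice xs (some a) (some b) =
      (xs.drop (PySem.List.clampIdx xs.length a)).take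
        (PySem.List.clampIdx xs.length b - PySem.List.clampIdx xs.length a) := rfl

-- for n < 0 and both cursors negative but within the string, A's wrapped lockstep scan
-- equals the comparison of the two clamped windows B slices out
lemma czLoop_eq_neg (cs : List Char) (n : Int) (hn : n < 0) :
    ∀ (i j : Int), -(cs.length : Int) ≤ i → i ≤ 0 → -(cs.length : Int) ≤ j → j ≤ 0 →
      czLoop cs (n - 1) i j =
        ltChars ((cs.drop ((cs.length : Int) + i).toNat).take
                   (PySem.List.clampIdx cs.length n - ((cs.length : Int) + i).toNat))
                ((cs.drop ((cs.length : Int) + j).toNat).take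
                   (PySem.List.clampIdx cs.length n - ((cs.length : Int) + j).toNat)) := by
  have hst : (PySem.List.clampIdx cs.length n : Int) = max ((cs.length : Int) + n) 0 := by
    simp only [PySem.List.clampIdx]; split_ifs <;> omega
  intro i j
  induction hfuel : (n - i).toNat using Nat.strong_induction_on generalizing i j with
  | _ f ih =>
    intro hi1 hi2 hj1 hj2
    rw [czLoop]
    by_cases hcond : i ≤ n - 1 ∧ j ≤ n - 1
    · obtain ⟨hin, hjn⟩ := hcond
      have hiL : ((cs.length : Int) + i).toNat < cs.length := by omega
      have hjL : ((cs.length : Int) + j).toNat < cs.length := by omega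
      rw [dif_pos ⟨hin, hjn⟩,
          pyGet?_neg_eq_some cs i hi1 (by omega) hiL,
          pyGet?_neg_eq_some cs j hj1 (by omega) hjL,
          List.drop_eq_getElem_cons hiL, List.drop_eq_getElem_cons hjL,
          show PySem.List.clampIdx cs.length n - ((cs.length : Int) + i).toNat =
            (PySem.List.clampIdx cs.length n - ((cs.length : Int) + (i + 1)).toNat) + 1 by omega,
          show PySem.List.clampIdx cs.length n - ((cs.length : Int) + j).toNat =
            (PySem.List.clampIdx cs.length n - ((cs.length : Int) + (j + 1)).toNat) + 1 by omega,
          List.take_succ_cons, List.take_succ_cons]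
      simp only [ltChars]
      rw [show ((cs.length : Int) + i).toNat + 1 = ((cs.length : Int) + (i + 1)).toNat by omega,
          show ((cs.length : Int) + j).toNat + 1 = ((cs.length : Int) + (j + 1)).toNat by omega]
      by_cases heq : cs[((cs.length : Int) + i).toNat] = cs[((cs.length : Int) + j).toNat]
      · rw [if_pos heq, if_pos heq]
        exact ih (n - (i + 1)).toNat (by omega) (i + 1) (j + 1) rfl (by omega) (by omega)
          (by omega) (by omega)
      · rw [if_neg heq, if_neg heq]
    · rw [dif_neg hcond]
      rcases not_and_or.mp hcond with hi' | hj'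
      · rw [show PySem.List.clampIdx cs.length n - ((cs.length : Int) + i).toNat = 0 by omega,
            List.take_zero]
        by_cases hj2' : j ≤ n - 1
        · rw [if_pos hj2']
          have hlen : 0 < ((cs.drop ((cs.length : Int) + j).toNat).take
              (PySem.List.clampIdx cs.length n - ((cs.length : Int) + j).toNat)).length := by
            rw [List.length_take, List.length_drop]; omega
          cases hys : (cs.drop ((cs.length : Int) + j).toNat).take
              (PySem.List.clampIdx cs.length n - ((cs.length : Int) + j).toNat) with
          | nil => rw [hys] at hlen; simp at hlen
          | cons b bs => rfl
        · rw [if_neg hj2',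
              show PySem.List.clampIdx cs.length n - ((cs.length : Int) + j).toNat = 0 by omega,
              List.take_zero]
          rfl
      · rw [if_neg hj',
            show PySem.List.clampIdx cs.length n - ((cs.length : Int) + j).toNat = 0 by omega,
            List.take_zero]
        cases (cs.drop ((cs.length : Int) + i).toNat).take
            (PySem.List.clampIdx cs.length n - ((cs.length : Int) + i).toNat) <;> rfl

-- a slice whose (clamped) stop lies at or before its nonnegative start is empty
lemma slice_nil_of_stop_le (xs : List Char) (a b : Int) (h0 : 0 ≤ a)
    (h : (xs.length : Int) + b ≤ a) : PySem.List.slice xs (some a) (some b) = [] := by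
  apply List.eq_nil_of_length_eq_zero
  rw [PySem.List.length_slice]
  simp only [PySem.List.clampIdx]
  split_ifs <;> omega

-- ===== VERDICT (by name: the statement is the Claim_ definition above) =====
theorem czymniejszy_spec : Claim_equal_czymniejszy := by
  intro n s k1 k2 _hdom hpre
  unfold Spec_czymniejszy czymniejszy czymniejszy_alt
  rcases hpre with ⟨hk1, hk2, hbig⟩ | ⟨heqk, hdiag⟩ | ⟨hn, hk1, hk2, hb1, hb2⟩ | ⟨hj, hcl⟩ | ⟨h1, h2, h3, h4, h5⟩
  · rcases hbig with ⟨hn0, hrest⟩ | ⟨hn, hsk2⟩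
    case inr =>
      -- n < 0 with k2 - 1 ≥ len(s)+n: loop skipped (False) and B's right slice is empty
      rw [czLoop, dif_neg (by omega), if_neg (by omega),
          slice_nil_of_stop_le s.toList (k2 - 1) n (by omega) hsk2]
      cases PySem.List.slice s.toList (some (k1 - 1)) (some n) <;> rfl
    rw [PySem.List.slice_toNat s.toList (by omega) hn0,
        PySem.List.slice_toNat s.toList (by omega) hn0]
    by_cases hnL : n ≤ (s.toList.length : Int)
    · exact czLoop_eq_ltChars s.toList n hn0 hnL (k1 - 1) (k2 - 1) (by omega) (by omega)
    rcases hrest with h | hj | ⟨hi, hjL⟩ | ⟨t, _, htiL, htjL, htne⟩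
    · exact absurd h hnL
    · -- k2 - 1 ≥ n: A's loop is skipped and returns False; B's right slice is empty
      rw [czLoop, dif_neg (by omega), if_neg (by omega),
          show n.toNat - (k2 - 1).toNat = 0 by omega, List.take_zero]
      cases (s.toList.drop (k1 - 1).toNat).take (n.toNat - (k1 - 1).toNat) <;> rfl
    · -- k1 - 1 ≥ n and k2 - 1 < len(s): loop skipped, A returns (k2 - 1 ≤ n - 1); left slice empty
      rw [czLoop, dif_neg (by omega),
          show n.toNat - (k1 - 1).toNat = 0 by omega, List.take_zero]
      by_cases hj2 : k2 - 1 ≤ n - 1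
      · rw [if_pos hj2]
        have hlen : 0 < ((s.toList.drop (k2 - 1).toNat).take (n.toNat - (k2 - 1).toNat)).length := by
          rw [List.length_take, List.length_drop]; omega
        cases hys : (s.toList.drop (k2 - 1).toNat).take (n.toNat - (k2 - 1).toNat) with
        | nil => rw [hys] at hlen; simp at hlen
        | cons b bs => rfl
      · rw [if_neg hj2, show n.toNat - (k2 - 1).toNat = 0 by omega, List.take_zero]
        rfl
    · -- an in-range mismatch ahead: both sides stop at the differing character
      exact czLoop_eq_of_mismatch s.toList n t (k1 - 1) (k2 - 1) (by omega) (by omega)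
        htiL htjL (by omega) (by omega) htne
  · -- k1 = k2: A scans equal characters (or skips) and returns False; B compares a slice to itself
    subst heqk
    rw [ltChars_self]
    rcases hdiag with hskip | ⟨hbound, hnL⟩
    · rw [czLoop, dif_neg (by omega), if_neg (by omega)]
    · exact czLoop_diag s.toList n hnL (k1 - 1) hbound
  · -- n < 0 with both start positions negative but inside the string:
    -- the wrapped lockstep scan is exactly the comparison of the two clamped windows
    rw [slice_eq_clamp, slice_eq_clamp,
        show PySem.List.clampIdx s.toList.length (k1 - 1) =
          ((s.toList.length : Int) + (k1 - 1)).toNat by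
            simp only [PySem.List.clampIdx]; split_ifs <;> omega,
        show PySem.List.clampIdx s.toList.length (k2 - 1) =
          ((s.toList.length : Int) + (k2 - 1)).toNat by
            simp only [PySem.List.clampIdx]; split_ifs <;> omega]
    exact czLoop_eq_neg s.toList n hn (k1 - 1) (k2 - 1) hb1 (by omega) hb2 (by omega)
  · -- k2 past n with an empty right slice: skipped loop (False) vs ltChars _ [] (False)
    rw [czLoop, dif_neg (by omega), if_neg (by omega), slice_eq_clamp s.toList (k2 - 1) n,
        show PySem.List.clampIdx s.toList.length n -
          PySem.List.clampIdx s.toList.length (k2 - 1) = 0 by omega, List.take_zero]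
    cases PySem.List.slice s.toList (some (k1 - 1)) (some n) <;> rfl
  · -- k1 past n, k2 before n: A returns True; B's left slice empty, right slice nonempty
    rw [czLoop, dif_neg (by omega), if_pos (by omega), slice_eq_clamp s.toList (k1 - 1) n,
        show PySem.List.clampIdx s.toList.length n -
          PySem.List.clampIdx s.toList.length (k1 - 1) = 0 by omega, List.take_zero,
        slice_eq_clamp s.toList (k2 - 1) n]
    have hlen : 0 < ((s.toList.drop (PySem.List.clampIdx s.toList.length (k2 - 1))).take
        (PySem.List.clampIdx s.toList.length n -
         PySem.List.clampIdx s.toList.length (k2 - 1))).length := by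
      rw [List.length_take, List.length_drop]; omega
    cases hys : (s.toList.drop (PySem.List.clampIdx s.toList.length (k2 - 1))).take
        (PySem.List.clampIdx s.toList.length n -
         PySem.List.clampIdx s.toList.length (k2 - 1)) with
    | nil => rw [hys] at hlen; simp at hlen
    | cons b bs => rfl
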